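-- pv_equiv track=rewrite | github.com/monta0315/atcoder | 129/d.py | check_yoko
-- ===== SOURCE A (Python) =====
-- def check_yoko(x, w, step):
--     num = 0
--     if x > w - 1:
--         return 0
--     if x < 0:
--         return 0
--     if step[x] == "#":
--         return 0
--     if step[x] == ":":
--         return 0
--
--     step[x] = ":"
--     num += check_yoko(x + 1, w, step)
--     num += check_yoko(x - 1, w, step)
--
--     return 1 + num
-- ===== SOURCE B (Python) =====
-- def check_yoko(x, w, step):
--     if x < 0 or x > w - 1 or step[x] in ("#", ":"):
--         return 0
--     step[x] = ":"
--     count = 1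
--     i = x + 1
--     while i <= w - 1 and step[i] not in ("#", ":"):
--         step[i] = ":"
--         count += 1
--         i += 1
--     i = x - 1
--     while i >= 0 and step[i] not in ("#", ":"):
--         step[i] = ":"
--         count += 1
--         i -= 1
--     return count
-- ===== Notes on version B (the rewrite author's own statement) =====
-- stated objective: idiomatic
-- what changed: Replaces A's two-way recursive flood fill (which re-visits marked cells through mutual x+1/x-1 calls) by a single guarded entry plus two iterative while-loop scans, right then left, with no recursion.
-- outside the precondition, e.g. on check_yoko(0, 5, ['#']): A returns 0, B returns 0; on check_yoko(0, 5, ['.', '#']): A returns 1, B returns 1; on check_yoko(0, 5, ['.']): A raises IndexError, B raises IndexError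
import Mathlib
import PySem

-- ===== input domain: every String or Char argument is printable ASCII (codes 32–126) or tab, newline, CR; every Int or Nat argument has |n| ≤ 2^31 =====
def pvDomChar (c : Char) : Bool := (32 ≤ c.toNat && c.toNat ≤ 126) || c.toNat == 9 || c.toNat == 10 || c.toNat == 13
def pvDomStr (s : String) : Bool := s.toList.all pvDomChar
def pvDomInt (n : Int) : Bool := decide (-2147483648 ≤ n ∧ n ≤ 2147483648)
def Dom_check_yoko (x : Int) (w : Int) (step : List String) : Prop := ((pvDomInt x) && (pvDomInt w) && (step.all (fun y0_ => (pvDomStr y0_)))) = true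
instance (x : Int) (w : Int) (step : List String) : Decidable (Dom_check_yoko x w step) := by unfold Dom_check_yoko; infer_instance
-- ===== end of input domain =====

-- B replaces A's recursive two-way flood fill by an iterative two-directional scan (no recursion);
-- equivalence is about the RETURN value, but B also performs the same in-place mutation of `step`.

-- ===== PORT A =====
-- A mutates `step` in place; the port threads the list through the recursion as state.
-- Fuel only bounds the recursion depth; `step.length + 2` is proved sufficient under Pre_.
def checkYokoA : Nat → Int → Int → List String → Int × List String
  | 0, _, _, step => (0, step)          -- fuel exhausted (never reached under Pre_)
  | fuel+1, x, w, step =>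
    if x > w - 1 then (0, step)
    else if x < 0 then (0, step)
    else
      match PySem.List.pyGet? step x with
      | none => (0, step)               -- step[x] would raise IndexError; excluded by Pre_
      | some s =>
        if s = "#" then (0, step)
        else if s = ":" then (0, step)
        else
          let step1 := PySem.List.pySetD step x ":"
          let p := checkYokoA fuel (x+1) w step1
          let q := checkYokoA fuel (x-1) w p.2
          (1 + (p.1 + q.1), q.2)

def check_yoko (x : Int) (w : Int) (step : List String) : Int :=
  (checkYokoA (step.length + 2) x w step).1

-- ===== PORT B =====
-- right-walk: while i <= w - 1 and step[i] not in ("#", ":"): mark, count, i += 1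
def walkR (i : Int) (w : Int) (step : List String) : Int × List String :=
  if h : i ≤ w - 1 then
    match PySem.List.pyGet? step i with
    | none => (0, step)                 -- step[i] would raise IndexError; excluded by Pre_
    | some s =>
      if s = "#" ∨ s = ":" then (0, step)
      else
        let p := walkR (i+1) w (PySem.List.pySetD step i ":")
        (1 + p.1, p.2)
  else (0, step)
termination_by (w - i).toNat
decreasing_by omega

-- left-walk: while i >= 0 and step[i] not in ("#", ":"): mark, count, i -= 1
def walkL (i : Int) (step : List String) : Int × List String :=
  if h : 0 ≤ i then
    match PySem.List.pyGet? step i with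
    | none => (0, step)
    | some s =>
      if s = "#" ∨ s = ":" then (0, step)
      else
        let p := walkL (i-1) (PySem.List.pySetD step i ":")
        (1 + p.1, p.2)
  else (0, step)
termination_by (i+1).toNat
decreasing_by omega

def check_yoko_alt (x : Int) (w : Int) (step : List String) : Int :=
  if x < 0 ∨ x > w - 1 then 0
  else
    match PySem.List.pyGet? step x with
    | none => 0
    | some s =>
      if s = "#" ∨ s = ":" then 0
      else
        let p := walkR (x+1) w (PySem.List.pySetD step x ":")
        let q := walkL (x-1) p.2
        1 + p.1 + q.1

-- ===== PRECONDITION & SPEC =====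
-- Pre_ excludes inputs with len(step) < w and 0 ≤ x < w, on which A's flood can run past the end of
-- `step` and raise IndexError; on some of those a "#"/":" cell blocks the flood first and A still
-- returns — those (already-blocked) inputs are excluded for the same out-of-range reason.
def Pre_check_yoko (x : Int) (w : Int) (step : List String) : Prop :=
  w ≤ (step.length : Int) ∨ x < 0 ∨ w ≤ x
instance (x : Int) (w : Int) (step : List String) : Decidable (Pre_check_yoko x w step) := by unfold Pre_check_yoko; infer_instance

def pvWitness_check_yoko : Int × Int × List String := (1, 3, [".", ".", "#"])

def Spec_check_yoko (x : Int) (w : Int) (step : List String) (out : Int) : Prop := out = check_yoko_alt x w step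
instance (x : Int) (w : Int) (step : List String) (out : Int) : Decidable (Spec_check_yoko x w step out) := by unfold Spec_check_yoko; infer_instance

-- ===== CLAIM (what is proved, stated in full; the proofs are below) =====
def Claim_equal_check_yoko : Prop := ∀ (x : Int) (w : Int) (step : List String), Dom_check_yoko x w step → Pre_check_yoko x w step → Spec_check_yoko x w step (check_yoko x w step)

-- ===== LEMMAS AND PROOFS =====

-- A returns (0, s) unchanged whenever a guard fires (any fuel ≥ 0)
theorem stopA (f : Nat) (y w : Int) (s : List String)
    (h : w - 1 < y ∨ y < 0 ∨ PySem.List.pyGet? s y = some "#" ∨ PySem.List.pyGet? s y = some ":") :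
    checkYokoA f y w s = (0, s) := by
  cases f with
  | zero => rfl
  | succ f =>
    simp only [checkYokoA]
    by_cases hg : y > w - 1
    · simp [hg]
    · by_cases hy : y < 0
      · simp [hg, hy]
      · rcases h with h | h | h | h
        · omega
        · omega
        · simp [hg, hy, h]
        · simp [hg, hy, h]

theorem pyGet?_mark_self (s : List String) (x : Int) (h0 : 0 ≤ x) (hlt : x.toNat < s.length) :
    PySem.List.pyGet? (PySem.List.pySetD s x ":") x = some ":" := by
  rw [PySem.List.pySetD_of_nonneg s ":" h0, PySem.List.pyGet?_of_nonneg _ h0,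
      List.getElem?_set_self hlt]

theorem pyGet?_mark_ne (s : List String) (x j : Int) (h0 : 0 ≤ j) (hx : 0 ≤ x) (hne : j ≠ x) :
    PySem.List.pyGet? (PySem.List.pySetD s x ":") j = PySem.List.pyGet? s j := by
  rw [PySem.List.pySetD_of_nonneg s ":" hx, PySem.List.pyGet?_of_nonneg _ h0,
      PySem.List.pyGet?_of_nonneg _ h0, List.getElem?_set_ne (by omega)]

theorem pyGet?_lt_length (s : List String) (x : Int) (v : String) (h0 : 0 ≤ x)
    (h : PySem.List.pyGet? s x = some v) : x.toNat < s.length := by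
  rw [PySem.List.pyGet?_of_nonneg _ h0] at h
  exact (List.getElem?_eq_some_iff.mp h).1

theorem walkR_frame (i w : Int) (s : List String) (j : Int) (h0 : 0 ≤ j) (hj : j < i) :
    PySem.List.pyGet? ((walkR i w s).2) j = PySem.List.pyGet? s j := by
  fun_induction walkR i w s with
  | case3 i step hle s hget hne p ih =>
      simp only [p]
      rw [ih (by omega), pyGet?_mark_ne step i j h0 (by omega) (by omega)]
  | _ => simp

-- one unfolding step of A in the free-cell case
theorem stepA_free (f : Nat) (x w : Int) (s : List String) (v : String)
    (h1 : ¬ x > w - 1) (h2 : ¬ x < 0) (hget : PySem.List.pyGet? s x = some v)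
    (hv1 : v ≠ "#") (hv2 : v ≠ ":") :
    checkYokoA (f+1) x w s =
      (1 + ((checkYokoA f (x+1) w (PySem.List.pySetD s x ":")).1 +
            (checkYokoA f (x-1) w ((checkYokoA f (x+1) w (PySem.List.pySetD s x ":")).2)).1),
       (checkYokoA f (x-1) w ((checkYokoA f (x+1) w (PySem.List.pySetD s x ":")).2)).2) := by
  simp only [checkYokoA, h1, h2, hget, hv1, hv2, if_false]

-- A on a cell whose LEFT neighbour is already marked floods only rightward = B's right walk
theorem chainR (w : Int) (f : Nat) : ∀ (x : Int) (s : List String),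
    (w - x).toNat + 1 ≤ f → 0 ≤ x →
    (x = 0 ∨ PySem.List.pyGet? s (x-1) = some ":") →
    checkYokoA f x w s = walkR x w s := by
  induction f with
  | zero => intro x s hf _ _; omega
  | succ f ih =>
    intro x s hf hx hl
    by_cases hgw : x > w - 1
    · rw [stopA _ _ _ _ (Or.inl hgw), walkR]
      simp [show ¬ x ≤ w - 1 from by omega]
    · rcases hget : PySem.List.pyGet? s x with _ | v
      · simp only [checkYokoA]
        rw [walkR]
        simp [hgw, show ¬ x < 0 from by omega, show x ≤ w - 1 from by omega, hget]
      · by_cases hv : v = "#" ∨ v = ":"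
        · rw [walkR]
          rcases hv with hv | hv
          · rw [stopA _ _ _ _ (Or.inr (Or.inr (Or.inl (hv ▸ hget))))]
            simp [show x ≤ w - 1 from by omega, hget, hv]
          · rw [stopA _ _ _ _ (Or.inr (Or.inr (Or.inr (hv ▸ hget))))]
            simp [show x ≤ w - 1 from by omega, hget, hv]
        · push_neg at hv
          have hlen : x.toNat < s.length := pyGet?_lt_length s x v hx hget
          simp only [checkYokoA]
          rw [walkR]
          simp only [hgw, show ¬ x < 0 from by omega, show x ≤ w - 1 from by omega,
            hget, hv.1, hv.2, if_false]
          have hp : checkYokoA f (x+1) w (PySem.List.pySetD s x ":")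
              = walkR (x+1) w (PySem.List.pySetD s x ":") := by
            have hfuel : (w - (x+1)).toNat + 1 ≤ f := by omega
            exact ih (x+1) (PySem.List.pySetD s x ":") hfuel (by omega)
              (Or.inr (by simpa using pyGet?_mark_self s x hx hlen))
          have hq : checkYokoA f (x-1) w ((walkR (x+1) w (PySem.List.pySetD s x ":")).2)
              = (0, (walkR (x+1) w (PySem.List.pySetD s x ":")).2) := by
            apply stopA
            by_cases hx1 : x = 0
            · right; left; omega
            · have hl' : PySem.List.pyGet? s (x-1) = some ":" := hl.resolve_left hx1
              right; right; right
              rw [walkR_frame _ _ _ _ (by omega) (by omega),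
                  pyGet?_mark_ne s x (x-1) (by omega) hx (by omega)]
              exact hl'
          rw [hp, hq]
          norm_num

-- A on a cell whose RIGHT neighbour is marked (or is the last column) floods only leftward = B's left walk
theorem chainL (w : Int) (f : Nat) : ∀ (y : Int) (s : List String),
    (y + 1).toNat + 1 ≤ f → y ≤ w - 1 →
    (w - 1 < y + 1 ∨ PySem.List.pyGet? s (y+1) = some ":") →
    checkYokoA f y w s = walkL y s := by
  induction f with
  | zero => intro y s hf _ _; omega
  | succ f ih =>
    intro y s hf hy hr
    by_cases hy0 : y < 0
    · rw [stopA _ _ _ _ (Or.inr (Or.inl hy0)), walkL]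
      simp [show ¬ 0 ≤ y from by omega]
    · rcases hget : PySem.List.pyGet? s y with _ | v
      · simp only [checkYokoA]
        rw [walkL]
        simp [show ¬ y > w - 1 from by omega, hy0, show (0:Int) ≤ y from by omega, hget]
      · by_cases hv : v = "#" ∨ v = ":"
        · rw [walkL]
          rcases hv with hv | hv
          · rw [stopA _ _ _ _ (Or.inr (Or.inr (Or.inl (hv ▸ hget))))]
            simp [show (0:Int) ≤ y from by omega, hget, hv]
          · rw [stopA _ _ _ _ (Or.inr (Or.inr (Or.inr (hv ▸ hget))))]
            simp [show (0:Int) ≤ y from by omega, hget, hv]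
        · push_neg at hv
          have hlen : y.toNat < s.length := pyGet?_lt_length s y v (by omega) hget
          simp only [checkYokoA]
          rw [walkL]
          simp only [show ¬ y > w - 1 from by omega, hy0, show (0:Int) ≤ y from by omega,
            hget, hv.1, hv.2, if_false]
          have hp : checkYokoA f (y+1) w (PySem.List.pySetD s y ":")
              = (0, PySem.List.pySetD s y ":") := by
            apply stopA
            rcases hr with hr | hr
            · left; omega
            · right; right; right
              rw [pyGet?_mark_ne s y (y+1) (by omega) (by omega) (by omega)]
              exact hr
          have hq : checkYokoA f (y-1) w (PySem.List.pySetD s y ":")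
              = walkL (y-1) (PySem.List.pySetD s y ":") := by
            have hfuel : (y - 1 + 1).toNat + 1 ≤ f := by omega
            exact ih (y-1) (PySem.List.pySetD s y ":") hfuel (by omega)
              (Or.inr (by simpa using pyGet?_mark_self s y (by omega) hlen))
          rw [hp, hq]
          norm_num

-- ===== VERDICT (by name: the statement is the Claim_ definition above) =====
theorem check_yoko_spec : Claim_equal_check_yoko := by
  intro x w step _ hpre
  unfold Spec_check_yoko check_yoko check_yoko_alt
  by_cases hx0 : x < 0 ∨ x > w - 1
  · rcases hx0 with h | h
    · rw [stopA _ _ _ _ (Or.inr (Or.inl h))]; simp [h]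
    · rw [stopA _ _ _ _ (Or.inl h)]; simp [h]
  · push_neg at hx0
    have hx : 0 ≤ x := hx0.1
    have hxw : x ≤ w - 1 := hx0.2
    have hlen : w ≤ (step.length : Int) := by
      rcases hpre with h | h | h
      · exact h
      · omega
      · omega
    have hxl : x.toNat < step.length := by omega
    have hget : PySem.List.pyGet? step x = some step[x.toNat] :=
      PySem.List.pyGet?_eq_some_getElem _ hx (by omega)
    by_cases hv : step[x.toNat] = "#" ∨ step[x.toNat] = ":"
    · rcases hv with hv | hv
      · rw [stopA _ _ _ _ (Or.inr (Or.inr (Or.inl (hv ▸ hget))))]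
        simp [show ¬ (x < 0 ∨ x > w - 1) from by omega, hget, hv]
      · rw [stopA _ _ _ _ (Or.inr (Or.inr (Or.inr (hv ▸ hget))))]
        simp [show ¬ (x < 0 ∨ x > w - 1) from by omega, hget, hv]
    · push_neg at hv
      have hstep : step.length + 2 = (step.length + 1) + 1 := by omega
      rw [hstep, stepA_free (step.length + 1) x w step step[x.toNat]
        (by omega) (by omega) hget hv.1 hv.2]
      simp only [show ¬ (x < 0 ∨ x > w - 1) from by omega, if_false, hget]
      have hp : checkYokoA (step.length + 1) (x+1) w (PySem.List.pySetD step x ":")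
          = walkR (x+1) w (PySem.List.pySetD step x ":") := by
        apply chainR w _ (x+1) _ (by omega) (by omega)
        right
        simpa using pyGet?_mark_self step x hx hxl
      have hq : checkYokoA (step.length + 1) (x-1) w ((walkR (x+1) w (PySem.List.pySetD step x ":")).2)
          = walkL (x-1) ((walkR (x+1) w (PySem.List.pySetD step x ":")).2) := by
        apply chainL w _ (x-1) _ (by omega) (by omega)
        right
        rw [show x - 1 + 1 = x from by omega,
            walkR_frame _ _ _ _ hx (by omega)]
        exact pyGet?_mark_self step x hx hxl
      rw [hp, hq]
      simp only [hv.1, hv.2, if_false]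
      ring_nf
      simp only [or_self, if_false]
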